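-- pv_equiv track=rewrite | github.com/yashb98/multi-agent-patterns | jobpulse/form_engine/select_filler.py | _fuzzy_match_option
-- ===== SOURCE A (Python) =====
-- _ABBREVIATIONS: dict[str, str] = {
--     "uk": "united kingdom",
--     "us": "united states",
--     "usa": "united states of america",
-- }
--
-- def _normalize(text: str) -> str:
--     """Lowercase, strip whitespace and punctuation for comparison."""
--     return text.lower().strip().strip(".,;:!?")
--
-- def _fuzzy_match_option(value: str, options: list[str]) -> str | None:
--     """Find the best matching option for a value.
--
--     Priority: exact → abbreviation → startswith → contains → None.
--     """
--     norm_value = _normalize(value)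
--
--     # Check abbreviation expansion
--     expanded = _ABBREVIATIONS.get(norm_value, norm_value)
--
--     for opt in options:
--         if _normalize(opt) == expanded:
--             return opt
--
--     for opt in options:
--         if _normalize(opt).startswith(expanded):
--             return opt
--
--     for opt in options:
--         if expanded in _normalize(opt):
--             return opt
--
--     return None
-- ===== SOURCE B (Python) =====
-- _ABBREVIATIONS: dict[str, str] = {
--     "uk": "united kingdom",
--     "us": "united states",
--     "usa": "united states of america",
-- }
--
-- def _normalize(text: str) -> str:
--     return text.lower().strip().strip(".,;:!?")
--
-- def _fuzzy_match_option(value: str, options: list[str]) -> str | None: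
--     norm_value = _normalize(value)
--     expanded = _ABBREVIATIONS.get(norm_value, norm_value)
--     best = None
--     best_p = 0
--     for opt in options:
--         n = _normalize(opt)
--         p = 3 if n == expanded else 2 if n.startswith(expanded) else 1 if expanded in n else 0
--         if p > best_p:
--             best, best_p = opt, p
--     return best
-- ===== Notes on version B (the rewrite author's own statement) =====
-- stated objective: faster
-- what changed: Replaced the three sequential early-return scans (exact, then startswith, then contains) by a single pass that scores each option 3/2/1/0 and keeps the first option with a strictly greater score.
import Mathlib
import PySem

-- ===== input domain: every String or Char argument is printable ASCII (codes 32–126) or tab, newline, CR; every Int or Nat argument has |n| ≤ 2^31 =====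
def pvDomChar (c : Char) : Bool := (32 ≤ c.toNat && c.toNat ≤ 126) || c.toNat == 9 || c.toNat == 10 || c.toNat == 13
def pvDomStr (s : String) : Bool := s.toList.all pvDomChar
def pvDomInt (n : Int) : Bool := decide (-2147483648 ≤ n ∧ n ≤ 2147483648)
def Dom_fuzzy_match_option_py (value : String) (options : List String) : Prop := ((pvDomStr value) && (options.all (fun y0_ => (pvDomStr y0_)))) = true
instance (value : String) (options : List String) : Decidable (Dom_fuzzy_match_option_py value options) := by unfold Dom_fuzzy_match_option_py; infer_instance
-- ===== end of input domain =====

-- B replaces A's three sequential early-return scans by one pass keeping the first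
-- option of strictly greatest priority (3 exact / 2 startswith / 1 contains / 0).

-- ===== PORT A =====
-- shared module helpers: _ABBREVIATIONS and _normalize
def pvAbbreviations : PySem.Dict String String :=
  PySem.Dict.ofList [("uk", "united kingdom"), ("us", "united states"), ("usa", "united states of america")]

def pvNormalize (text : String) : String :=
  PySem.Str.stripChars (PySem.Str.strip (PySem.Str.lower text)) ".,;:!?"

def fuzzy_match_option_py (value : String) (options : List String) : Option String :=
  let norm_value := pvNormalize value
  let expanded := pvAbbreviations.getD norm_value norm_value
  match options.find? (fun opt => pvNormalize opt == expanded) with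
  | some opt => some opt
  | none =>
    match options.find? (fun opt => PySem.Str.startswith (pvNormalize opt) expanded) with
    | some opt => some opt
    | none => options.find? (fun opt => PySem.Str.isIn expanded (pvNormalize opt))

-- ===== PORT B =====
def pvPrio (expanded n : String) : Nat :=
  if n == expanded then 3
  else if PySem.Str.startswith n expanded then 2
  else if PySem.Str.isIn expanded n then 1
  else 0

def pvStep (expanded : String) (st : Option String × Nat) (opt : String) : Option String × Nat :=
  let p := pvPrio expanded (pvNormalize opt)
  if st.2 < p then (some opt, p) else st

def fuzzy_match_option_py_alt (value : String) (options : List String) : Option String :=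
  let norm_value := pvNormalize value
  let expanded := pvAbbreviations.getD norm_value norm_value
  (options.foldl (pvStep expanded) (none, 0)).1

-- ===== PRECONDITION & SPEC =====
def Spec_fuzzy_match_option_py (value : String) (options : List String) (out : Option String) : Prop := out = fuzzy_match_option_py_alt value options
instance (value : String) (options : List String) (out : Option String) : Decidable (Spec_fuzzy_match_option_py value options out) := by unfold Spec_fuzzy_match_option_py; infer_instance

-- ===== CLAIM (what is proved, stated in full; the proofs are below) =====
def Claim_equal_fuzzy_match_option_py : Prop := ∀ (value : String) (options : List String), Dom_fuzzy_match_option_py value options → Spec_fuzzy_match_option_py value options (fuzzy_match_option_py value options)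

-- ===== LEMMAS AND PROOFS =====

-- the single strict-improvement fold, characterised for each possible start priority
theorem pv_fold_spec (e : String) (l : List String) : ∀ (b : Option String),
    (l.foldl (pvStep e) (b, 3)) = (b, 3)
  ∧ (l.foldl (pvStep e) (b, 2)).1
      = (match l.find? (fun opt => pvNormalize opt == e) with
         | some o => some o | none => b)
  ∧ (l.foldl (pvStep e) (b, 1)).1
      = (match l.find? (fun opt => pvNormalize opt == e) with
         | some o => some o
         | none =>
           match l.find? (fun opt => PySem.Str.startswith (pvNormalize opt) e) with
           | some o => some o | none => b)
  ∧ (l.foldl (pvStep e) (b, 0)).1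
      = (match l.find? (fun opt => pvNormalize opt == e) with
         | some o => some o
         | none =>
           match l.find? (fun opt => PySem.Str.startswith (pvNormalize opt) e) with
           | some o => some o
           | none =>
             match l.find? (fun opt => PySem.Str.isIn e (pvNormalize opt)) with
             | some o => some o | none => b) := by
  induction l with
  | nil => intro b; simp
  | cons hd tl ih =>
    intro b
    by_cases he : (pvNormalize hd == e) = true
    · have hp : pvPrio e (pvNormalize hd) = 3 := by
        simp only [pvPrio]; rw [if_pos he]
      have h3 : pvStep e (b, 3) hd = (b, 3) := by simp [pvStep, hp]
      have h2 : pvStep e (b, 2) hd = (some hd, 3) := by simp [pvStep, hp]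
      have h1 : pvStep e (b, 1) hd = (some hd, 3) := by simp [pvStep, hp]
      have h0 : pvStep e (b, 0) hd = (some hd, 3) := by simp [pvStep, hp]
      refine ⟨?_, ?_, ?_, ?_⟩
      · rw [List.foldl_cons, h3]; exact (ih b).1
      · rw [List.foldl_cons, h2, (ih (some hd)).1]
        simp only [List.find?_cons, he]
      · rw [List.foldl_cons, h1, (ih (some hd)).1]
        simp only [List.find?_cons, he]
      · rw [List.foldl_cons, h0, (ih (some hd)).1]
        simp only [List.find?_cons, he]
    · rw [Bool.not_eq_true] at he
      by_cases hs : PySem.Str.startswith (pvNormalize hd) e = true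
      · have hp : pvPrio e (pvNormalize hd) = 2 := by
          simp only [pvPrio]; rw [if_neg (by simp [he]), if_pos hs]
        have h3 : pvStep e (b, 3) hd = (b, 3) := by simp [pvStep, hp]
        have h2 : pvStep e (b, 2) hd = (b, 2) := by simp [pvStep, hp]
        have h1 : pvStep e (b, 1) hd = (some hd, 2) := by simp [pvStep, hp]
        have h0 : pvStep e (b, 0) hd = (some hd, 2) := by simp [pvStep, hp]
        refine ⟨?_, ?_, ?_, ?_⟩
        · rw [List.foldl_cons, h3]; exact (ih b).1
        · rw [List.foldl_cons, h2, (ih b).2.1]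
          simp only [List.find?_cons, he]
        · rw [List.foldl_cons, h1, (ih (some hd)).2.1]
          simp only [List.find?_cons, he, hs]
        · rw [List.foldl_cons, h0, (ih (some hd)).2.1]
          simp only [List.find?_cons, he, hs]
      · rw [Bool.not_eq_true] at hs
        by_cases hc : PySem.Str.isIn e (pvNormalize hd) = true
        · have hp : pvPrio e (pvNormalize hd) = 1 := by
            simp only [pvPrio]; rw [if_neg (by simp [he]), if_neg (by rw [Bool.not_eq_true]; exact hs), if_pos hc]
          have h3 : pvStep e (b, 3) hd = (b, 3) := by simp [pvStep, hp]
          have h2 : pvStep e (b, 2) hd = (b, 2) := by simp [pvStep, hp]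
          have h1 : pvStep e (b, 1) hd = (b, 1) := by simp [pvStep, hp]
          have h0 : pvStep e (b, 0) hd = (some hd, 1) := by simp [pvStep, hp]
          refine ⟨?_, ?_, ?_, ?_⟩
          · rw [List.foldl_cons, h3]; exact (ih b).1
          · rw [List.foldl_cons, h2, (ih b).2.1]
            simp only [List.find?_cons, he]
          · rw [List.foldl_cons, h1, (ih b).2.2.1]
            simp only [List.find?_cons, he, hs]
          · rw [List.foldl_cons, h0, (ih (some hd)).2.2.1]
            simp only [List.find?_cons, he, hs, hc]
        · rw [Bool.not_eq_true] at hc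
          have hp : pvPrio e (pvNormalize hd) = 0 := by
            simp only [pvPrio]
            rw [if_neg (by simp [he]), if_neg (by rw [Bool.not_eq_true]; exact hs), if_neg (by rw [Bool.not_eq_true]; exact hc)]
          have h3 : pvStep e (b, 3) hd = (b, 3) := by simp [pvStep, hp]
          have h2 : pvStep e (b, 2) hd = (b, 2) := by simp [pvStep, hp]
          have h1 : pvStep e (b, 1) hd = (b, 1) := by simp [pvStep, hp]
          have h0 : pvStep e (b, 0) hd = (b, 0) := by simp [pvStep, hp]
          refine ⟨?_, ?_, ?_, ?_⟩
          · rw [List.foldl_cons, h3]; exact (ih b).1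
          · rw [List.foldl_cons, h2, (ih b).2.1]
            simp only [List.find?_cons, he]
          · rw [List.foldl_cons, h1, (ih b).2.2.1]
            simp only [List.find?_cons, he, hs]
          · rw [List.foldl_cons, h0, (ih b).2.2.2]
            simp only [List.find?_cons, he, hs, hc]

theorem pv_opt_match_id (o : Option String) :
    (match o with | some x => some x | none => (none : Option String)) = o := by
  cases o <;> rfl

-- ===== VERDICT (by name: the statement is the Claim_ definition above) =====
theorem fuzzy_match_option_py_spec : Claim_equal_fuzzy_match_option_py := by
  intro value options _
  unfold Spec_fuzzy_match_option_py fuzzy_match_option_py fuzzy_match_option_py_alt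
  rw [(pv_fold_spec (pvAbbreviations.getD (pvNormalize value) (pvNormalize value)) options none).2.2.2]
  simp only [pv_opt_match_id]
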